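-- pv_equiv track=rewrite | github.com/jeiwils/text_emphasis | src/b2_RUNNING_text_analytics.py | compute_corpus_frequencies
-- ===== SOURCE A (Python) =====
-- from collections import Counter
--
-- def compute_corpus_frequencies(texts, lowercase=True, min_freq=1):
--     """
--     Computes corpus-level word frequencies from a list of texts.
--
--     Args:
--         texts (list of str): List of documents or corpus segments.
--         lowercase (bool): Whether to lowercase words.
--         min_freq (int): Minimum frequency to include in the output.
--
--     Returns:
--         dict: {word: frequency} for all words in the corpus.
--     """
--     word_counter = Counter()
--     for text in texts:
--         words = [w.lower() if lowercase else w
--                  for w in text.split() if w.isalpha()]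
--         word_counter.update(words)
--
--     # Apply minimum frequency threshold
--     corpus_freqs = {w: freq for w, freq in word_counter.items() if freq >= min_freq}
--     return corpus_freqs
-- ===== SOURCE B (Python) =====
-- def compute_corpus_frequencies(texts, lowercase=True, min_freq=1):
--     """Sort the flat token list once and read each frequency off as the
--     length of a run of equal tokens; no running Counter is maintained.
--     First-occurrence order of the result is restored via dict.fromkeys."""
--     tokens = [w.lower() if lowercase else w
--               for text in texts for w in text.split() if w.isalpha()]
--     srt = sorted(tokens)
--     counts = {}
--     i = 0
--     while i < len(srt):
--         j = i
--         while j < len(srt) and srt[j] == srt[i]: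
--             j += 1
--         counts[srt[i]] = j - i
--         i = j
--     return {w: counts[w] for w in dict.fromkeys(tokens) if counts[w] >= min_freq}
-- ===== Notes on version B (the rewrite author's own statement) =====
-- stated objective: alternative
-- what changed: Replaces the incrementally-updated Counter with a sort-then-scan: the flat token list is sorted once and each frequency is read off as the length of a run of equal tokens, with first-occurrence order restored via dict.fromkeys; it trades hash counting for sorting at similar overall cost.
import Mathlib
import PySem

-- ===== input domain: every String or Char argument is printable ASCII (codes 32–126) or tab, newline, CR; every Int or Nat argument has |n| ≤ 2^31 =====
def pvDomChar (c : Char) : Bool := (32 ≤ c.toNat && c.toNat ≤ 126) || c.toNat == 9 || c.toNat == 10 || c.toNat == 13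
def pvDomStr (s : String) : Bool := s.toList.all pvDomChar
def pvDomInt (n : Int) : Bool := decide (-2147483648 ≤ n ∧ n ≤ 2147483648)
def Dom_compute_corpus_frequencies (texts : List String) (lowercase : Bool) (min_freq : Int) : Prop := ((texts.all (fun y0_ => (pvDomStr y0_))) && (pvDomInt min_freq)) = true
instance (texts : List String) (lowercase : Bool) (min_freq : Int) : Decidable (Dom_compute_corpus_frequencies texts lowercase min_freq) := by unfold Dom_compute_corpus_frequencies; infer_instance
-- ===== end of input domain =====

-- ===== PORT A =====
-- B sorts the flat token list once and reads each frequency off a run of equal tokens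
-- instead of maintaining a running Counter; return value proved identical.
-- [w.lower() if lowercase else w for w in text.split() if w.isalpha()]
def pvTokensA (lowercase : Bool) (text : String) : List String :=
  ((PySem.Str.split₀ text).filter (fun w => PySem.Str.strIsalpha w)).map
    (fun w => if lowercase then PySem.Str.lower w else w)

def compute_corpus_frequencies (texts : List String) (lowercase : Bool) (min_freq : Int) : List (String × Int) :=
  let word_counter : PySem.Dict String Int :=
    texts.foldl
      (fun d text => (pvTokensA lowercase text).foldl (fun d w => d.modify w 0 (· + 1)) d)
      PySem.Dict.empty
  (word_counter.items.foldl
      (fun d wf => if min_freq ≤ wf.2 then d.insert wf.1 wf.2 else d)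
      (PySem.Dict.empty : PySem.Dict String Int)).items

-- ===== PORT B =====
def pvTokensB (lowercase : Bool) (text : String) : List String :=
  ((PySem.Str.split₀ text).filter (fun w => PySem.Str.strIsalpha w)).map
    (fun w => if lowercase then PySem.Str.lower w else w)

-- Source B's while loop over the sorted list: each outer step consumes one run of equal
-- tokens (the inner 'while srt[j] == srt[i]' is the takeWhile/dropWhile split) and
-- records its length.
def pvCountRuns : List String → PySem.Dict String Int → PySem.Dict String Int
  | [], d => d
  | x :: xs, d =>
      pvCountRuns (xs.dropWhile (fun y => y == x))
        (d.insert x (1 + ((xs.takeWhile (fun y => y == x)).length : Int)))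
termination_by ys _ => ys.length
decreasing_by
  exact Nat.lt_succ_of_le (List.length_dropWhile_le _ _)

def compute_corpus_frequencies_alt (texts : List String) (lowercase : Bool) (min_freq : Int) : List (String × Int) :=
  let tokens : List String := texts.flatMap (fun text => pvTokensB lowercase text)
  let srt := PySem.List.sorted tokens (fun w => w) false
  let counts := pvCountRuns srt PySem.Dict.empty
  -- counts[w]: w is always a key here (w ∈ tokens), so the lookup cannot raise
  ((PySem.List.dedup tokens).foldl
      (fun d w => if min_freq ≤ counts.getD w 0 then d.insert w (counts.getD w 0) else d)
      (PySem.Dict.empty : PySem.Dict String Int)).items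

-- ===== PRECONDITION & SPEC =====
def Spec_compute_corpus_frequencies (texts : List String) (lowercase : Bool) (min_freq : Int) (out : List (String × Int)) : Prop := out = compute_corpus_frequencies_alt texts lowercase min_freq
instance (texts : List String) (lowercase : Bool) (min_freq : Int) (out : List (String × Int)) : Decidable (Spec_compute_corpus_frequencies texts lowercase min_freq out) := by unfold Spec_compute_corpus_frequencies; infer_instance

-- ===== CLAIM (what is proved, stated in full; the proofs are below) =====
def Claim_equal_compute_corpus_frequencies : Prop := ∀ (texts : List String) (lowercase : Bool) (min_freq : Int), Dom_compute_corpus_frequencies texts lowercase min_freq → Spec_compute_corpus_frequencies texts lowercase min_freq (compute_corpus_frequencies texts lowercase min_freq)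

-- ===== LEMMAS AND PROOFS =====

-- A's per-text Counter updates are one fold over the flattened token list.
theorem pv_foldl_texts_eq_flatMap (tok : String → List String)
    (step : PySem.Dict String Int → String → PySem.Dict String Int)
    (texts : List String) (d : PySem.Dict String Int) :
    texts.foldl (fun d t => (tok t).foldl step d) d = (texts.flatMap tok).foldl step d := by
  induction texts generalizing d with
  | nil => rfl
  | cons t ts ih => simp [List.flatMap_cons, List.foldl_append, ih]

-- On a ≤-sorted list, run-length counting records exactly each element's multiplicity.
theorem pv_getD_pvCountRuns (ys : List String) (h : ys.Pairwise (· ≤ ·))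
    (d : PySem.Dict String Int) (w : String) :
    (pvCountRuns ys d).getD w 0 = if w ∈ ys then (ys.count w : Int) else d.getD w 0 := by
  induction ys, d using pvCountRuns.induct with
  | case1 d => simp [pvCountRuns]
  | case2 x xs d ih =>
    have hxs : xs.Pairwise (· ≤ ·) := (List.pairwise_cons.mp h).2
    have hle : ∀ y ∈ xs, x ≤ y := (List.pairwise_cons.mp h).1
    have hsplit : xs.takeWhile (fun y => y == x) ++ xs.dropWhile (fun y => y == x) = xs :=
      List.takeWhile_append_dropWhile
    have hrest_pw : (xs.dropWhile (fun y => y == x)).Pairwise (· ≤ ·) :=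
      hxs.sublist (List.dropWhile_sublist _)
    have hrun_eq : ∀ y ∈ xs.takeWhile (fun y => y == x), y = x := by
      intro y hy
      have hb : (y == x) = true := @List.mem_takeWhile_imp _ (fun y => y == x) xs y hy
      exact eq_of_beq hb
    -- every element of the dropped rest is strictly greater than x
    have hrest_gt : ∀ z ∈ xs.dropWhile (fun y => y == x), x < z := by
      intro z hz
      rcases hr : xs.dropWhile (fun y => y == x) with _ | ⟨r0, rtl⟩
      · rw [hr] at hz; simp at hz
      · have hr0ne : ¬ (r0 == x) = true := by
          have := List.head?_dropWhile_not (fun y => y == x) xs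
          rw [hr] at this; simpa using this
        have hr0mem : r0 ∈ xs := (List.dropWhile_sublist _).subset (by rw [hr]; simp)
        have hxr0 : x < r0 := lt_of_le_of_ne (hle r0 hr0mem) (fun e => hr0ne (by simp [e.symm]))
        rw [hr] at hz
        rcases List.mem_cons.mp hz with rfl | hz'
        · exact hxr0
        · have : r0 ≤ z := (List.pairwise_cons.mp (hr ▸ hrest_pw)).1 z hz'
          exact lt_of_lt_of_le hxr0 this
    have hx_notin_rest : x ∉ xs.dropWhile (fun y => y == x) := by
      intro hx; exact absurd (hrest_gt x hx) (lt_irrefl x)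
    have hxcount : ∀ v : String, xs.count v
        = (xs.takeWhile (fun y => y == x)).count v + (xs.dropWhile (fun y => y == x)).count v := by
      intro v
      conv_lhs => rw [← hsplit]
      rw [List.count_append]
    rw [pvCountRuns]
    rw [ih hrest_pw]
    by_cases hw : w = x
    · rw [hw]
      rw [if_neg hx_notin_rest, PySem.Dict.getD_insert_self,
        if_pos (List.mem_cons_self (a := x) (l := xs))]
      have hcount_run : (xs.takeWhile (fun y => y == x)).count x
          = (xs.takeWhile (fun y => y == x)).length :=
        List.count_eq_length.mpr (fun b hb => (hrun_eq b hb).symm)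
      have hcount_rest : (xs.dropWhile (fun y => y == x)).count x = 0 :=
        List.count_eq_zero.mpr hx_notin_rest
      have hc : (x :: xs).count x = 1 + (xs.takeWhile (fun y => y == x)).length := by
        rw [List.count_cons_self, hxcount x, hcount_run, hcount_rest]
        omega
      rw [hc]; push_cast; ring
    · have hw' : w ∉ xs.takeWhile (fun y => y == x) := fun hmem => hw (hrun_eq w hmem)
      have hcount_run0 : (xs.takeWhile (fun y => y == x)).count w = 0 :=
        List.count_eq_zero.mpr hw'
      by_cases hwr : w ∈ xs.dropWhile (fun y => y == x)
      · rw [if_pos hwr]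
        have hwmem : w ∈ x :: xs := by
          refine List.mem_cons.mpr (Or.inr ?_)
          rw [← hsplit]; exact List.mem_append.mpr (Or.inr hwr)
        rw [if_pos hwmem]
        have hc : (x :: xs).count w = (xs.dropWhile (fun y => y == x)).count w := by
          rw [List.count_cons_of_ne (Ne.symm hw), hxcount w, hcount_run0]
          omega
        rw [hc]
      · rw [if_neg hwr, PySem.Dict.getD_insert_of_ne _ _ _ hw]
        have hnot : w ∉ x :: xs := by
          intro hmem
          rcases List.mem_cons.mp hmem with rfl | hmem'
          · exact hw rfl
          · rw [← hsplit] at hmem'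
            rcases List.mem_append.mp hmem' with h1 | h2
            · exact hw' h1
            · exact hwr h2
        rw [if_neg hnot]

theorem compute_corpus_frequencies_spec' (texts : List String) (lowercase : Bool) (min_freq : Int) :
    compute_corpus_frequencies texts lowercase min_freq = compute_corpus_frequencies_alt texts lowercase min_freq := by
  unfold compute_corpus_frequencies compute_corpus_frequencies_alt
  rw [pv_foldl_texts_eq_flatMap]
  show PySem.Dict.items
      ((PySem.Dict.counter (texts.flatMap (fun t => pvTokensA lowercase t))).items.foldl
        (fun d wf => if min_freq ≤ wf.2 then d.insert wf.1 wf.2 else d) PySem.Dict.empty) = _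
  rw [PySem.Dict.items_counter, List.foldl_map]
  have htok : (fun t => pvTokensB lowercase t) = (fun t => pvTokensA lowercase t) := rfl
  rw [htok]
  set tokens := texts.flatMap (fun t => pvTokensA lowercase t) with htokens
  set srt := PySem.List.sorted tokens (fun w => w) false with hsrt
  have hperm : srt.Perm tokens := PySem.List.sorted_perm tokens (fun w => w) false
  have hpw : srt.Pairwise (· ≤ ·) := PySem.List.sorted_pairwise tokens (fun w => w)
  have hcounts : ∀ w ∈ PySem.List.dedup tokens,
      (pvCountRuns srt PySem.Dict.empty).getD w 0 = (tokens.count w : Int) := by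
    intro w hw
    have hw' : w ∈ srt := hperm.mem_iff.mpr ((PySem.List.mem_dedup tokens w).mp hw)
    rw [pv_getD_pvCountRuns srt hpw PySem.Dict.empty w, if_pos hw', hperm.count_eq]
  have hfold := PySem.List.foldl_congr_mem
    (l := PySem.List.dedup tokens)
    (f := fun d k => if min_freq ≤ (tokens.count k : Int) then d.insert k (tokens.count k : Int) else d)
    (g := fun d w => if min_freq ≤ (pvCountRuns srt PySem.Dict.empty).getD w 0
                     then d.insert w ((pvCountRuns srt PySem.Dict.empty).getD w 0) else d)
    (init := (PySem.Dict.empty : PySem.Dict String Int))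
    (by intro acc x hx; dsimp only; rw [hcounts x hx])
  simp only [PySem.List.dedup_eq_ofList] at hfold ⊢
  rw [hfold]

-- ===== VERDICT (by name: the statement is the Claim_ definition above) =====
theorem compute_corpus_frequencies_spec : Claim_equal_compute_corpus_frequencies := by
  intro texts lowercase min_freq _
  exact compute_corpus_frequencies_spec' texts lowercase min_freq
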